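-- pv_equiv track=rewrite | github.com/MShverdiakov/matrix-support | src/core/game_analyzer.py | remove_unmentioned_row
-- ===== SOURCE A (Python) =====
-- def remove_unmentioned_row(matrix):
--     """Удаляет строки, которые не содержат максимумов в столбцах"""
--     rows = len(matrix)
--     cols = len(matrix[0])
--
--     # Шаг 1: Найти максимумы в каждом столбце и сохранить номера строк
--     mentioned_rows = set()
--     for col in range(cols):
--         max_value = max(row[col] for row in matrix)  # Находим максимум в столбце
--         for row_index in range(rows):
--             if matrix[row_index][col] == max_value:
--                 mentioned_rows.add(row_index)  # Запоминаем строку, содержащую максимум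
--
--     # Шаг 2: Найти все строки, которые не упоминались в максимумах
--     unmentioned_rows = [row_index for row_index in range(rows) if row_index not in mentioned_rows]
--
--     if not unmentioned_rows:
--         return matrix  # Если все строки были упомянуты, ничего не удаляем
--
--     # Удаляем все строки, которые не упоминались
--     new_matrix = [row for i, row in enumerate(matrix) if i not in unmentioned_rows]
--     return new_matrix
-- ===== SOURCE B (Python) =====
-- def remove_unmentioned_row(matrix):
--     """Удаляет строки, которые не содержат максимумов в столбцах"""
--     cols = len(matrix[0])
--     return [row for row in matrix
--             if any(all(other[c] <= row[c] for other in matrix)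
--                    for c in range(cols))]
-- ===== Notes on version B (the rewrite author's own statement) =====
-- stated objective: alternative
-- what changed: B never computes any column maximum or index set: a row is kept iff it dominates every row in some column, tested by direct pairwise comparison in one filtering comprehension (shorter code, at quadratic-in-rows cost).
import Mathlib
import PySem

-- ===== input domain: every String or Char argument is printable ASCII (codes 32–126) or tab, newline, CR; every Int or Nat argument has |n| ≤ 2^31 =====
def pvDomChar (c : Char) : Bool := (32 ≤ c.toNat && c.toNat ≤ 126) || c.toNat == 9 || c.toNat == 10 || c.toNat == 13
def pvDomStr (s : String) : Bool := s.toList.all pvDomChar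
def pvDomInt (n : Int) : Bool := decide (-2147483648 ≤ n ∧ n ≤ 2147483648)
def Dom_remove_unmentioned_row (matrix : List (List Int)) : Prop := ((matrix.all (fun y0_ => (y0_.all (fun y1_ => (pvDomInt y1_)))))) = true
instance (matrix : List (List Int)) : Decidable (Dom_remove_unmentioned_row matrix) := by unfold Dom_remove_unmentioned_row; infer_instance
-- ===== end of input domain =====

-- B computes no column maxima and no index sets: a row is kept iff it dominates every
-- row in some column, one filtering pass of pairwise comparisons (objective: alternative; not faster).

-- ===== PORT A =====
def remove_unmentioned_row (matrix : List (List Int)) : List (List Int) :=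
  let rows : Int := matrix.length
  -- matrix[0]: Pre_ excludes the empty matrix, where Python raises IndexError
  let cols : Int := (PySem.List.pyGetD matrix 0 []).length
  -- Шаг 1: mentioned_rows as a Python set of row indices
  let mentioned : PySem.Set Int :=
    (PySem.List.pyRange 0 cols 1).foldl (fun s col =>
      -- max(row[col] for row in matrix); Pre_ guarantees every row[col] is in range
      let max_value : Int :=
        (PySem.List.max? (matrix.map (fun row => PySem.List.pyGetD row col 0)) (fun x => x)).getD 0
      (PySem.List.pyRange 0 rows 1).foldl (fun s' row_index =>
        if PySem.List.pyGetD (PySem.List.pyGetD matrix row_index []) col 0 = max_value then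
          PySem.Set.add s' row_index
        else s') s)
      PySem.Set.empty
  -- Шаг 2: indices not mentioned
  let unmentioned : List Int :=
    (PySem.List.pyRange 0 rows 1).filter (fun ri => !(PySem.Set.contains mentioned ri))
  if unmentioned = [] then matrix
  else
    ((PySem.List.enumerate matrix 0).filter (fun p => !(unmentioned.contains p.1))).map (·.2)

-- ===== PORT B =====
def remove_unmentioned_row_alt (matrix : List (List Int)) : List (List Int) :=
  let cols : Int := (PySem.List.pyGetD matrix 0 []).length
  matrix.filter (fun row =>
    (PySem.List.pyRange 0 cols 1).any (fun c =>
      matrix.all (fun other =>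
        decide (PySem.List.pyGetD other c 0 ≤ PySem.List.pyGetD row c 0))))

-- ===== PRECONDITION & SPEC =====
-- Pre_ excludes exactly the inputs where Python A raises IndexError: the empty matrix
-- (matrix[0]) and ragged matrices with a row shorter than the first row (row[col]).
def Pre_remove_unmentioned_row (matrix : List (List Int)) : Prop :=
  matrix ≠ [] ∧ ∀ row ∈ matrix, matrix.headI.length ≤ row.length
instance (matrix : List (List Int)) : Decidable (Pre_remove_unmentioned_row matrix) := by
  unfold Pre_remove_unmentioned_row; infer_instance
def pvWitness_remove_unmentioned_row : List (List Int) := [[1, 2], [3, 0]]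

def Spec_remove_unmentioned_row (matrix : List (List Int)) (out : List (List Int)) : Prop :=
  out = remove_unmentioned_row_alt matrix
instance (matrix : List (List Int)) (out : List (List Int)) : Decidable (Spec_remove_unmentioned_row matrix out) := by
  unfold Spec_remove_unmentioned_row; infer_instance

-- ===== CLAIM (what is proved, stated in full; the proofs are below) =====
def Claim_equal_remove_unmentioned_row : Prop := ∀ (matrix : List (List Int)), Dom_remove_unmentioned_row matrix → Pre_remove_unmentioned_row matrix → Spec_remove_unmentioned_row matrix (remove_unmentioned_row matrix)

-- ===== LEMMAS AND PROOFS =====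

-- membership in the inner fold that conditionally adds row indices
theorem pv_mem_inner_fold (l : List Int) (P : Int → Prop) [DecidablePred P]
    (s : PySem.Set Int) (i : Int) :
    (i ∈ l.foldl (fun s' x => if P x then PySem.Set.add s' x else s') s) ↔
      i ∈ s ∨ (i ∈ l ∧ P i) := by
  induction l generalizing s with
  | nil => simp
  | cons x t ih =>
    simp only [List.foldl_cons, ih, List.mem_cons]
    by_cases hx : P x
    · simp only [if_pos hx, PySem.Set.mem_add]
      constructor
      · rintro ((h | rfl) | h)
        · exact Or.inl h
        · exact Or.inr ⟨Or.inl rfl, hx⟩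
        · exact Or.inr ⟨Or.inr h.1, h.2⟩
      · rintro (h | ⟨(rfl | h), hp⟩)
        · exact Or.inl (Or.inl h)
        · exact Or.inl (Or.inr rfl)
        · exact Or.inr ⟨h, hp⟩
    · simp only [if_neg hx]
      constructor
      · rintro (h | h)
        · exact Or.inl h
        · exact Or.inr ⟨Or.inr h.1, h.2⟩
      · rintro (h | ⟨(rfl | h), hp⟩)
        · exact Or.inl h
        · exact absurd hp hx
        · exact Or.inr ⟨h, hp⟩

-- membership in the outer fold over columns
theorem pv_mem_outer_fold (cl rl : List Int) (P : Int → Int → Prop)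
    [∀ c r, Decidable (P c r)] (s : PySem.Set Int) (i : Int) :
    (i ∈ cl.foldl (fun s col =>
        rl.foldl (fun s' ri => if P col ri then PySem.Set.add s' ri else s') s) s) ↔
      i ∈ s ∨ ∃ c ∈ cl, i ∈ rl ∧ P c i := by
  induction cl generalizing s with
  | nil => simp
  | cons c t ih =>
    simp only [List.foldl_cons, ih, pv_mem_inner_fold, List.mem_cons]
    constructor
    · rintro ((h | h) | ⟨c', hc', h⟩)
      · exact Or.inl h
      · exact Or.inr ⟨c, Or.inl rfl, h⟩
      · exact Or.inr ⟨c', Or.inr hc', h⟩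
    · rintro (h | ⟨c', (rfl | hc'), h⟩)
      · exact Or.inl (Or.inl h)
      · exact Or.inl (Or.inr h)
      · exact Or.inr ⟨c', hc', h⟩

-- the enumerate/filter-on-index/map-snd pipeline is a content filter when the
-- index test agrees with the content test
theorem pv_enum_filter_map (keep : List Int → Bool) (pred : Int × List Int → Bool)
    (xs : List (List Int)) (s : Int)
    (h : ∀ (k : Nat) (hk : k < xs.length), pred (s + k, xs[k]) = keep xs[k]) :
    ((PySem.List.enumerate xs s).filter pred).map (·.2) = xs.filter keep := by
  induction xs generalizing s with
  | nil => simp [PySem.List.enumerate_nil]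
  | cons x t ih =>
    have h0 : pred (s, x) = keep x := by
      have := h 0 (by simp)
      simpa using this
    have ht : ∀ (k : Nat) (hk : k < t.length), pred (s + 1 + k, t[k]) = keep t[k] := by
      intro k hk
      have := h (k + 1) (by simpa using Nat.succ_lt_succ hk)
      simpa [add_comm, add_left_comm, add_assoc] using this
    rw [PySem.List.enumerate_cons]
    by_cases hx : keep x = true
    · simp [h0, hx, ih (s + 1) ht]
    · have hx' : keep x = false := by simpa using hx
      simp [h0, hx', ih (s + 1) ht]

-- the column maximum of column c (proof-only abbreviation)
def pvM (matrix : List (List Int)) (c : Int) : Int :=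
  (PySem.List.max? (matrix.map (fun row => PySem.List.pyGetD row c 0)) (fun x => x)).getD 0

-- "row contains a column maximum" (proof-only abbreviation)
def pvKeep (matrix : List (List Int)) (row : List Int) : Bool :=
  (PySem.List.pyRange 0 ((PySem.List.pyGetD matrix 0 []).length : Int) 1).any
    (fun c => PySem.List.pyGetD row c 0 == pvM matrix c)

theorem pv_keep_iff (matrix : List (List Int)) (row : List Int) :
    pvKeep matrix row = true ↔
      ∃ c ∈ PySem.List.pyRange 0 ((PySem.List.pyGetD matrix 0 []).length : Int) 1,
        PySem.List.pyGetD row c 0 = pvM matrix c := by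
  simp [pvKeep, List.any_eq_true]

-- for a nonempty matrix, "row's entry equals the column-c maximum" is the same test
-- as "row's entry dominates every row's entry in column c"
theorem pv_max_iff_dominates (matrix : List (List Int)) (h : matrix ≠ []) (row : List Int)
    (hrow : row ∈ matrix) (c : Int) :
    (PySem.List.pyGetD row c 0 = pvM matrix c) ↔
      ∀ other ∈ matrix,
        PySem.List.pyGetD other c 0 ≤ PySem.List.pyGetD row c 0 := by
  set L := matrix.map (fun r => PySem.List.pyGetD r c 0) with hL
  have hLne : L ≠ [] := by
    simpa [hL] using h
  obtain ⟨m, hm⟩ : ∃ m, PySem.List.max? L (fun x => x) = some m := by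
    cases hmax : PySem.List.max? L (fun x => x) with
    | none => rw [PySem.List.max?_eq_none_iff] at hmax; exact absurd hmax hLne
    | some m => exact ⟨m, rfl⟩
  have hMval : pvM matrix c = m := by simp [pvM, ← hL, hm]
  have hmem : m ∈ L := PySem.List.max?_mem hm
  have hmax : ∀ y ∈ L, y ≤ m := PySem.List.max?_isMax hm
  rw [hMval]
  constructor
  · intro heq other hother
    have : PySem.List.pyGetD other c 0 ∈ L := by
      simp [hL]; exact ⟨other, hother, rfl⟩
    rw [heq]; exact hmax _ this
  · intro hdom
    rcases List.mem_map.mp (by simpa [hL] using hmem) with ⟨other, hother, hoe⟩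
    have h1 : m ≤ PySem.List.pyGetD row c 0 := hoe ▸ hdom other hother
    have h2 : PySem.List.pyGetD row c 0 ≤ m := by
      apply hmax; simp [hL]; exact ⟨row, hrow, rfl⟩
    omega

theorem pvB_eq (matrix : List (List Int)) (h : matrix ≠ []) :
    remove_unmentioned_row_alt matrix = matrix.filter (pvKeep matrix) := by
  simp only [remove_unmentioned_row_alt]
  apply List.filter_congr
  intro row hrow
  rw [Bool.eq_iff_iff]
  simp only [pvKeep, List.any_eq_true, beq_iff_eq, List.all_eq_true, decide_eq_true_eq]
  constructor
  · rintro ⟨c, hc, hall⟩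
    exact ⟨c, hc, (pv_max_iff_dominates matrix h row hrow c).mpr hall⟩
  · rintro ⟨c, hc, heq⟩
    exact ⟨c, hc, (pv_max_iff_dominates matrix h row hrow c).mp heq⟩

theorem pvA_eq (matrix : List (List Int)) :
    remove_unmentioned_row matrix = matrix.filter (pvKeep matrix) := by
  simp only [remove_unmentioned_row]
  split_ifs with h
  · -- no row was removed: every row satisfies pvKeep
    rw [List.filter_eq_nil_iff] at h
    symm
    rw [List.filter_eq_self]
    intro row hrow
    rcases List.mem_iff_getElem.mp hrow with ⟨k, hk, rfl⟩
    have hr : (k : Int) ∈ PySem.List.pyRange 0 (matrix.length : Int) 1 := by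
      rw [PySem.List.mem_pyRange_one]; constructor <;> [positivity; exact_mod_cast hk]
    have hmen := h _ hr
    simp only [Bool.not_eq_true', Bool.not_eq_false] at hmen
    rw [PySem.Set.contains_iff, pv_mem_outer_fold] at hmen
    rcases hmen with hmen | ⟨c, hc, _, hP⟩
    · simp at hmen
    · rw [pv_keep_iff]
      refine ⟨c, hc, ?_⟩
      rw [PySem.List.pyGetD_natCast, List.getD_eq_getElem _ _ hk] at hP
      exact hP
  · -- some rows removed: the enumerate/filter/map pipeline is the content filter
    apply pv_enum_filter_map
    intro k hk
    have h0 : ((0:Int) + (k:Nat)) = (k : Int) := by ring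
    simp only [h0]
    rw [Bool.eq_iff_iff, Bool.not_eq_true', ← Bool.not_eq_true]
    rw [List.contains_iff_mem, List.mem_filter]
    have hr : (k : Int) ∈ PySem.List.pyRange 0 (matrix.length : Int) 1 := by
      rw [PySem.List.mem_pyRange_one]; constructor <;> [positivity; exact_mod_cast hk]
    simp only [hr, true_and, Bool.not_eq_true', Bool.not_eq_false]
    rw [PySem.Set.contains_iff, pv_mem_outer_fold, pv_keep_iff]
    simp only [PySem.Set.empty, List.not_mem_nil, false_or]
    constructor
    · rintro ⟨c, hc, _, hP⟩
      refine ⟨c, hc, ?_⟩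
      rw [PySem.List.pyGetD_natCast, List.getD_eq_getElem _ _ hk] at hP
      exact hP
    · rintro ⟨c, hc, hP⟩
      refine ⟨c, hc, hr, ?_⟩
      rw [PySem.List.pyGetD_natCast, List.getD_eq_getElem _ _ hk]
      exact hP

-- ===== VERDICT (by name: the statement is the Claim_ definition above) =====
theorem remove_unmentioned_row_spec : Claim_equal_remove_unmentioned_row := by
  intro matrix _ hpre
  unfold Spec_remove_unmentioned_row
  rw [pvA_eq, pvB_eq matrix hpre.1]
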